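-- pv_equiv track=rewrite | github.com/MrBrantCode/unitest_baseline | mut_generate/mist_train_taco/taco_19107/solution.py | max_increasing_subarray_length
-- ===== SOURCE A (Python) =====
-- def max_increasing_subarray_length(a, n):
--     if n == 0:
--         return 0
--
--     # dp[i][0] will store the length of the longest increasing subarray ending at i
--     # dp[i][1] will store the length of the longest increasing subarray ending at i after removing one element
--     dp = [[1 for _ in range(2)] for _ in range(n)]
--
--     # Initialize the first element
--     dp[0][0] = 1
--     dp[0][1] = 1
--
--     max_length = 1
--
--     for i in range(1, n):
--         # If the current element is greater than the previous element
--         if a[i] > a[i - 1]: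
--             dp[i][0] = dp[i - 1][0] + 1
--             dp[i][1] = dp[i - 1][1] + 1
--
--         # If the current element is greater than the element before the previous element
--         if i > 1 and a[i] > a[i - 2]:
--             dp[i][1] = max(dp[i][1], dp[i - 2][0] + 1)
--
--         # Update the maximum length found so far
--         max_length = max(max_length, dp[i][0], dp[i][1])
--
--     return max_length
-- ===== SOURCE B (Python) =====
-- def max_increasing_subarray_length(a, n):
--     if n <= 0:
--         return 0
--     left = [1] * n
--     for i in range(1, n):
--         if a[i] > a[i - 1]:
--             left[i] = left[i - 1] + 1
--     right = [1] * n
--     for i in range(n - 2, -1, -1):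
--         if a[i] < a[i + 1]:
--             right[i] = right[i + 1] + 1
--     best = max(left)
--     for j in range(1, n - 1):
--         if a[j - 1] < a[j + 1]:
--             best = max(best, left[j - 1] + right[j + 1])
--     return best
-- ===== Notes on version B (the rewrite author's own statement) =====
-- stated objective: alternative
-- what changed: Replaces the fused two-state DP (a list of [len-ending-here, len-after-one-removal] pairs maintained in one forward loop) by two directional run tables left[i]/right[i] computed in separate forward and backward passes plus a distinct combining pass over removal positions j with a[j-1] < a[j+1].
import Mathlib
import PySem

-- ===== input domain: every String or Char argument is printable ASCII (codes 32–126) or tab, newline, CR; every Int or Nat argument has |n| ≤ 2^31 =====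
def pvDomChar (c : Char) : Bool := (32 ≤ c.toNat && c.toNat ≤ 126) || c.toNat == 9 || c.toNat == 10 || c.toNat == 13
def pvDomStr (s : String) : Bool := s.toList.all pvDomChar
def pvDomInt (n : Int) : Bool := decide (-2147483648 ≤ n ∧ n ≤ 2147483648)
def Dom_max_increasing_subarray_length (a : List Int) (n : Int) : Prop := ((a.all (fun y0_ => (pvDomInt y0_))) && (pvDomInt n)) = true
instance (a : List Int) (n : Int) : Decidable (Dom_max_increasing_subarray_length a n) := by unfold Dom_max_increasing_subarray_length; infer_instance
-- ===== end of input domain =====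

-- B differs from A only in algorithm/decomposition (directional run tables vs fused two-state DP);
-- same return value on every input A accepts (Pre_ excludes exactly the inputs where A raises IndexError).

-- ===== PORT A =====
-- loop body of A's single forward DP loop (dp is the list of [len-ending-here, len-with-one-removal] pairs)
def stepA (a : List Int) (st : List (Int × Int) × Int) (i : Int) : List (Int × Int) × Int :=
  let dp := st.1
  let maxLength := st.2
  let cur := PySem.List.pyGetD dp i ((1 : Int), (1 : Int))
  -- if a[i] > a[i-1]: dp[i][0] = dp[i-1][0]+1; dp[i][1] = dp[i-1][1]+1
  let cur := if PySem.List.pyGetD a i 0 > PySem.List.pyGetD a (i - 1) 0 then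
      ((PySem.List.pyGetD dp (i - 1) ((1 : Int), (1 : Int))).1 + 1,
       (PySem.List.pyGetD dp (i - 1) ((1 : Int), (1 : Int))).2 + 1)
    else cur
  -- if i > 1 and a[i] > a[i-2]: dp[i][1] = max(dp[i][1], dp[i-2][0]+1)
  let cur := if i > 1 ∧ PySem.List.pyGetD a i 0 > PySem.List.pyGetD a (i - 2) 0 then
      (cur.1, max cur.2 ((PySem.List.pyGetD dp (i - 2) ((1 : Int), (1 : Int))).1 + 1))
    else cur
  let dp := PySem.List.pySetD dp i cur
  (dp, max (max maxLength cur.1) cur.2)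

def max_increasing_subarray_length (a : List Int) (n : Int) : Int :=
  if n = 0 then 0
  else
    -- dp = [[1,1] for _ in range(n)]; dp[0][0] = 1; dp[0][1] = 1
    let dp := (PySem.List.pyRange 0 n 1).map (fun _ => ((1 : Int), (1 : Int)))
    let dp := PySem.List.pySetD dp 0 ((1 : Int), (1 : Int))
    let r := (PySem.List.pyRange 1 n 1).foldl (stepA a) (dp, 1)
    r.2

-- ===== PORT B =====
-- forward pass: left[i] = left[i-1]+1 when a[i] > a[i-1]
def stepL (a : List Int) (L : List Int) (i : Int) : List Int :=
  if PySem.List.pyGetD a i 0 > PySem.List.pyGetD a (i - 1) 0 then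
    PySem.List.pySetD L i (PySem.List.pyGetD L (i - 1) 1 + 1)
  else L

-- backward pass: right[i] = right[i+1]+1 when a[i] < a[i+1]
def stepR (a : List Int) (R : List Int) (i : Int) : List Int :=
  if PySem.List.pyGetD a i 0 < PySem.List.pyGetD a (i + 1) 0 then
    PySem.List.pySetD R i (PySem.List.pyGetD R (i + 1) 1 + 1)
  else R

-- combining pass: try removing a[j], merging the run ending at j-1 with the run starting at j+1
def stepC (a L R : List Int) (best : Int) (j : Int) : Int :=
  if PySem.List.pyGetD a (j - 1) 0 < PySem.List.pyGetD a (j + 1) 0 then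
    max best (PySem.List.pyGetD L (j - 1) 1 + PySem.List.pyGetD R (j + 1) 1)
  else best

def max_increasing_subarray_length_alt (a : List Int) (n : Int) : Int :=
  if n ≤ 0 then 0
  else
    let left := PySem.List.pyRepeat [(1 : Int)] n
    let left := (PySem.List.pyRange 1 n 1).foldl (stepL a) left
    let right := PySem.List.pyRepeat [(1 : Int)] n
    let right := (PySem.List.pyRange (n - 2) (-1) (-1)).foldl (stepR a) right
    let best := (PySem.List.max? left (fun x => x)).getD 1   -- max(left); left is nonempty since n ≥ 1
    let best := (PySem.List.pyRange 1 (n - 1) 1).foldl (stepC a left right) best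
    best

-- ===== PRECONDITION & SPEC =====
-- Pre_ excludes exactly the inputs where A raises IndexError: n < 0 (dp is empty, dp[0][0] fails)
-- and n > len(a) (a[i] out of range).
def Pre_max_increasing_subarray_length (a : List Int) (n : Int) : Prop :=
  n = 0 ∨ (1 ≤ n ∧ n ≤ a.length)
instance (a : List Int) (n : Int) : Decidable (Pre_max_increasing_subarray_length a n) := by
  unfold Pre_max_increasing_subarray_length; infer_instance
def pvWitness_max_increasing_subarray_length : List Int × Int := ([1, 2, 10, 3, 4, 5, 6], 7)

def Spec_max_increasing_subarray_length (a : List Int) (n : Int) (out : Int) : Prop := out = max_increasing_subarray_length_alt a n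
instance (a : List Int) (n : Int) (out : Int) : Decidable (Spec_max_increasing_subarray_length a n out) := by unfold Spec_max_increasing_subarray_length; infer_instance

-- ===== CLAIM (what is proved, stated in full; the proofs are below) =====
def Claim_equal_max_increasing_subarray_length : Prop := ∀ (a : List Int) (n : Int), Dom_max_increasing_subarray_length a n → Pre_max_increasing_subarray_length a n → Spec_max_increasing_subarray_length a n (max_increasing_subarray_length a n)

-- ===== LEMMAS AND PROOFS =====

-- a[i] as a total function on Nat indices
def av (a : List Int) (i : Nat) : Int := a.getD i 0

-- length of the strictly increasing run ending at i (A's dp[i][0], B's left[i])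
def lf (a : List Int) : Nat → Int
  | 0 => 1
  | i + 1 => if av a i < av a (i + 1) then lf a i + 1 else 1

-- A's dp[i][1]
def d1 (a : List Int) : Nat → Int
  | 0 => 1
  | i + 1 =>
    let b := if av a i < av a (i + 1) then d1 a i + 1 else 1
    if 1 ≤ i ∧ av a (i - 1) < av a (i + 1) then max b (lf a (i - 1) + 1) else b

-- length of the strictly increasing run starting at i, within the first n entries (B's right[i])
def rg (a : List Int) (n : Nat) (i : Nat) : Int :=
  if h : i + 1 < n ∧ av a i < av a (i + 1) then rg a n (i + 1) + 1 else 1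
  termination_by n - i
  decreasing_by omega

-- A's running maximum after processing indices 1..k
def mA (a : List Int) : Nat → Int
  | 0 => 1
  | k + 1 => max (max (mA a k) (lf a (k + 1))) (d1 a (k + 1))

-- running maximum of left[0..k]
def bestL (a : List Int) : Nat → Int
  | 0 => 1
  | k + 1 => max (bestL a k) (lf a (k + 1))


lemma lf_pos (a : List Int) : ∀ i, 1 ≤ lf a i := by
  intro i
  induction i with
  | zero => simp [lf]
  | succ i ih => simp only [lf]; split <;> omega

lemma rg_pos (a : List Int) (n i : Nat) : 1 ≤ rg a n i := by
  fun_induction rg a n i with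
  | case1 i h ih => omega
  | case2 i h => omega

lemma d1_succ_ge (a : List Int) (i : Nat) (h : av a i < av a (i + 1)) :
    d1 a i + 1 ≤ d1 a (i + 1) := by
  simp only [d1, h, if_true]
  split <;> omega

lemma d1_merge (a : List Int) (i : Nat) (h1 : 1 ≤ i) (h2 : av a (i - 1) < av a (i + 1)) :
    lf a (i - 1) + 1 ≤ d1 a (i + 1) := by
  simp only [d1]
  rw [if_pos ⟨h1, h2⟩]
  omega

lemma mA_ge_d1 (a : List Int) (k : Nat) : ∀ i, i ≤ k → d1 a i ≤ mA a k := by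
  induction k with
  | zero => intro i hi; interval_cases i; simp [d1, mA]
  | succ k ih =>
    intro i hi
    rcases Nat.lt_or_ge i (k + 1) with h | h
    · have := ih i (by omega); simp only [mA]; omega
    · have : i = k + 1 := by omega
      subst this; simp only [mA]; omega

lemma bestL_ge_lf (a : List Int) (k : Nat) : ∀ i, i ≤ k → lf a i ≤ bestL a k := by
  induction k with
  | zero => intro i hi; interval_cases i; simp [lf, bestL]
  | succ k ih =>
    intro i hi
    rcases Nat.lt_or_ge i (k + 1) with h | h
    · have := ih i (by omega); simp only [bestL]; omega
    · have : i = k + 1 := by omega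
      subst this; simp only [bestL]; omega

lemma bestL_le_mA (a : List Int) (k : Nat) : bestL a k ≤ mA a k := by
  induction k with
  | zero => simp [bestL, mA]
  | succ k ih => simp only [bestL, mA]; omega

lemma bestL_mem (a : List Int) (k : Nat) : ∃ j, j ≤ k ∧ bestL a k = lf a j := by
  induction k with
  | zero => exact ⟨0, le_refl 0, by simp [bestL, lf]⟩
  | succ k ih =>
    obtain ⟨j, hj, hje⟩ := ih
    simp only [bestL]
    rcases max_choice (bestL a k) (lf a (k + 1)) with h | h
    · exact ⟨j, by omega, by omega⟩
    · exact ⟨k + 1, le_refl _, h⟩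

lemma run_rg_aux (a : List Int) (n : Nat) : ∀ (d j : Nat), j + 1 + d < n →
    (∀ k, j + 1 ≤ k → k < j + 1 + d → av a k < av a (k + 1)) →
    (d : Int) + 1 ≤ rg a n (j + 1) := by
  intro d
  induction d with
  | zero => intro j _ _; simpa using rg_pos a n (j + 1)
  | succ d ih =>
    intro j hn hrun
    rw [rg]
    rw [dif_pos ⟨by omega, hrun (j + 1) (by omega) (by omega)⟩]
    have := ih (j + 1) (by omega) (fun k hk1 hk2 => hrun k (by omega) (by omega))
    push_cast
    omega

lemma run_rg (a : List Int) (n : Nat) (i j : Nat) (h1 : j + 1 ≤ i) (h2 : i < n)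
    (hrun : ∀ k, j + 1 ≤ k → k < i → av a k < av a (k + 1)) :
    (i : Int) - (j : Int) ≤ rg a n (j + 1) := by
  have := run_rg_aux a n (i - (j + 1)) j (by omega)
    (fun k hk1 hk2 => hrun k hk1 (by omega))
  have hc : ((i - (j + 1) : Nat) : Int) = (i : Int) - j - 1 := by omega
  omega

lemma d1_char (a : List Int) : ∀ i, d1 a i ≤ lf a i ∨
    ∃ j, 1 ≤ j ∧ j < i ∧ av a (j - 1) < av a (j + 1) ∧
      (∀ k, j + 1 ≤ k → k < i → av a k < av a (k + 1)) ∧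
      d1 a i ≤ lf a (j - 1) + ((i : Int) - (j : Int)) := by
  intro i
  induction i with
  | zero => left; simp [d1, lf]
  | succ i ih =>
    by_cases hstep : av a i < av a (i + 1)
    · -- b = d1 i + 1
      have hb : ∀ r, d1 a (i + 1) = r → r ≤ max (d1 a i + 1) (if 1 ≤ i ∧ av a (i - 1) < av a (i + 1) then lf a (i - 1) + 1 else d1 a i + 1) := by
        intro r hr
        simp only [d1, hstep, if_true] at hr
        split at hr <;> split <;> omega
      have hub : d1 a (i + 1) ≤ max (d1 a i + 1) (if 1 ≤ i ∧ av a (i - 1) < av a (i + 1) then lf a (i - 1) + 1 else d1 a i + 1) := hb _ rfl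
      by_cases hm : 1 ≤ i ∧ av a (i - 1) < av a (i + 1)
      · rw [if_pos hm] at hub
        rcases ih with h | ⟨j, hj1, hj2, hj3, hj4, hj5⟩
        · -- d1 i ≤ lf i; candidates: lf(i+1) or j = i
          rcases le_max_iff.mp hub with h2 | h2
          · left; simp only [lf, hstep, if_true]; omega
          · right
            exact ⟨i, hm.1, by omega, hm.2, by intro k hk1 hk2; omega, by push_cast; omega⟩
        · rcases le_max_iff.mp hub with h2 | h2
          · right
            refine ⟨j, hj1, by omega, hj3, ?_, ?_⟩
            · intro k hk1 hk2
              rcases Nat.lt_or_ge k i with hk | hk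
              · exact hj4 k hk1 hk
              · have : k = i := by omega
                subst this; exact hstep
            · push_cast; omega
          · right
            exact ⟨i, hm.1, by omega, hm.2, by intro k hk1 hk2; omega, by push_cast; omega⟩
      · rw [if_neg hm] at hub
        have hub2 : d1 a (i + 1) ≤ d1 a i + 1 := by omega
        rcases ih with h | ⟨j, hj1, hj2, hj3, hj4, hj5⟩
        · left; simp only [lf, hstep, if_true]; omega
        · right
          refine ⟨j, hj1, by omega, hj3, ?_, ?_⟩
          · intro k hk1 hk2
            rcases Nat.lt_or_ge k i with hk | hk
            · exact hj4 k hk1 hk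
            · have : k = i := by omega
              subst this; exact hstep
          · push_cast; omega
    · -- b = 1
      have hub : d1 a (i + 1) ≤ max 1 (if 1 ≤ i ∧ av a (i - 1) < av a (i + 1) then lf a (i - 1) + 1 else 1) := by
        simp only [d1, hstep, if_false]
        split <;> omega
      by_cases hm : 1 ≤ i ∧ av a (i - 1) < av a (i + 1)
      · rw [if_pos hm] at hub
        rcases le_max_iff.mp hub with h2 | h2
        · left; have := lf_pos a (i + 1); omega
        · right
          exact ⟨i, hm.1, by omega, hm.2, by intro k hk1 hk2; omega, by push_cast; omega⟩
      · rw [if_neg hm] at hub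
        left; have := lf_pos a (i + 1); omega

lemma d1_rg_le (a : List Int) (N : Nat) (hN : 1 ≤ N) : ∀ (f i : Nat), N - i ≤ f → i < N →
    d1 a i + rg a N i - 1 ≤ mA a (N - 1) := by
  intro f
  induction f with
  | zero => intro i h1 h2; omega
  | succ f ih =>
    intro i h1 h2
    rw [rg]
    by_cases hc : i + 1 < N ∧ av a i < av a (i + 1)
    · rw [dif_pos hc]
      have h3 := d1_succ_ge a i hc.2
      have h4 := ih (i + 1) (by omega) hc.1
      omega
    · rw [dif_neg hc]
      have := mA_ge_d1 a (N - 1) i (by omega)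
      omega

-- generic running-max-with-condition fold
lemma gfold_init_le (c : Int → Prop) [DecidablePred c] (v : Int → Int) :
    ∀ (L : List Int) (init : Int), init ≤ L.foldl (fun acc x => if c x then max acc (v x) else acc) init := by
  intro L
  induction L with
  | nil => intro init; simp
  | cons x t ih =>
    intro init
    simp only [List.foldl_cons]
    have := ih (if c x then max init (v x) else init)
    have : init ≤ (if c x then max init (v x) else init) := by split <;> omega
    calc init ≤ (if c x then max init (v x) else init) := this
      _ ≤ _ := ih _

lemma gfold_le (c : Int → Prop) [DecidablePred c] (v : Int → Int) (m : Int) :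
    ∀ (L : List Int) (init : Int), init ≤ m → (∀ x ∈ L, c x → v x ≤ m) →
    L.foldl (fun acc x => if c x then max acc (v x) else acc) init ≤ m := by
  intro L
  induction L with
  | nil => intro init h _; simpa using h
  | cons x t ih =>
    intro init h hall
    simp only [List.foldl_cons]
    apply ih
    · by_cases hc : c x
      · rw [if_pos hc]; exact max_le h (hall x (by simp) hc)
      · rwa [if_neg hc]
    · intro y hy hcy; exact hall y (by simp [hy]) hcy

lemma gfold_mem_le (c : Int → Prop) [DecidablePred c] (v : Int → Int) :
    ∀ (L : List Int) (init x : Int), x ∈ L → c x →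
    v x ≤ L.foldl (fun acc y => if c y then max acc (v y) else acc) init := by
  intro L
  induction L with
  | nil => intro init x hx; simp at hx
  | cons z t ih =>
    intro init x hx hcx
    simp only [List.foldl_cons]
    rcases List.mem_cons.mp hx with h | h
    · subst h
      rw [if_pos hcx]
      calc v x ≤ max init (v x) := le_max_right _ _
        _ ≤ _ := gfold_init_le c v t _
    · exact ih _ x h hcx


lemma av_eq (a : List Int) (i : Nat) : a.getD i 0 = av a i := rfl

lemma invA (a : List Int) (n : Int) (h1 : 1 ≤ n) :
    ∀ t : Nat, t ≤ n.toNat - 1 →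
    ∃ D : List (Int × Int),
      (PySem.List.pyRange 1 (1 + (t : Int))).foldl (stepA a) (List.replicate n.toNat ((1:Int),(1:Int)), 1) = (D, mA a t)
      ∧ D.length = n.toNat
      ∧ (∀ j : Nat, D.getD j ((1:Int),(1:Int)) = if j ≤ t ∧ j < n.toNat then (lf a j, d1 a j) else ((1:Int),(1:Int))) := by
  intro t
  induction t with
  | zero =>
    intro ht
    refine ⟨List.replicate n.toNat ((1:Int),(1:Int)), ?_, by simp, ?_⟩
    · rw [show (1 : Int) + ((0:Nat):Int) = 1 by ring, PySem.List.pyRange_one_eq_nil (le_refl 1)]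
      simp [mA]
    · intro j
      split
      · next h =>
        have : j = 0 := by omega
        subst this
        rw [List.getD_replicate _ (by omega)]
        simp [lf, d1]
      · next h =>
        rcases Nat.lt_or_ge j n.toNat with hj | hj
        · rw [List.getD_replicate _ hj]
        · rw [List.getD_eq_default _ _ (by simpa using hj)]
  | succ t ih =>
    intro ht
    obtain ⟨D, hfold, hlen, hget⟩ := ih (by omega)
    have htN : t + 1 < n.toNat := by omega
    have hgetT1 : D.getD (t+1) ((1:Int),(1:Int)) = ((1:Int),(1:Int)) := by
      rw [hget (t+1), if_neg (by omega)]
    have hgetT : D.getD t ((1:Int),(1:Int)) = (lf a t, d1 a t) := by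
      rw [hget t, if_pos (by omega)]
    have hsplit : PySem.List.pyRange 1 (1 + ((t+1 : Nat) : Int)) = PySem.List.pyRange 1 (1 + (t:Int)) ++ [1 + (t:Int)] := by
      rw [show (1 : Int) + ((t+1 : Nat) : Int) = (1 + (t:Int)) + 1 by push_cast; ring]
      exact PySem.List.pyRange_one_succ_right (by omega)
    rw [hsplit, List.foldl_append, hfold]
    simp only [List.foldl_cons, List.foldl_nil]
    rw [show (1 : Int) + (t:Int) = ((t+1 : Nat) : Int) by push_cast; ring]
    simp only [stepA]
    rw [show ((t+1 : Nat) : Int) - 1 = ((t : Nat) : Int) by push_cast; ring]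
    simp only [PySem.List.pyGetD_natCast, av_eq]
    rw [hgetT1, hgetT]
    -- the first conditional produces (lf a (t+1), b)
    have hcur1 : (if av a (t+1) > av a t then ((lf a t, d1 a t).1 + 1, (lf a t, d1 a t).2 + 1) else ((1:Int),(1:Int)))
        = (lf a (t+1), if av a t < av a (t+1) then d1 a t + 1 else 1) := by
      simp only [lf, gt_iff_lt]
      split <;> rfl
    rw [hcur1]
    -- the second conditional produces (lf a (t+1), d1 a (t+1))
    have hcond2 : ∀ (x y : Int × Int),
        (if ((t+1 : Nat) : Int) > 1 ∧ av a (t+1) > PySem.List.pyGetD a (((t+1 : Nat) : Int) - 2) 0 then x else y)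
        = (if 1 ≤ t ∧ av a (t - 1) < av a (t+1) then x else y) := by
      intro x y
      rcases Nat.eq_zero_or_pos t with h0 | h0
      · subst h0
        rw [if_neg (by simp), if_neg (by omega)]
      · rw [show ((t+1 : Nat) : Int) - 2 = ((t - 1 : Nat) : Int) by push_cast [h0]; ring]
        rw [PySem.List.pyGetD_natCast, av_eq]
        by_cases hc : av a (t - 1) < av a (t + 1)
        · rw [if_pos ⟨by push_cast; omega, hc⟩, if_pos ⟨h0, hc⟩]
        · rw [if_neg (by tauto), if_neg (by tauto)]
    rw [hcond2]
    have hd1 : d1 a (t+1) = if 1 ≤ t ∧ av a (t - 1) < av a (t+1)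
        then max (if av a t < av a (t+1) then d1 a t + 1 else 1) (lf a (t-1) + 1)
        else (if av a t < av a (t+1) then d1 a t + 1 else 1) := by
      simp only [d1]
    refine ⟨PySem.List.pySetD D ((t+1 : Nat) : Int) (lf a (t+1), d1 a (t+1)), ?_, ?_, ?_⟩
    · by_cases hc : 1 ≤ t ∧ av a (t - 1) < av a (t+1)
      · rw [if_pos hc]
        have hgetTm : D.getD (t-1) ((1:Int),(1:Int)) = (lf a (t-1), d1 a (t-1)) := by
          rw [hget (t-1), if_pos (by omega)]
        rw [show ((t+1 : Nat) : Int) - 2 = ((t - 1 : Nat) : Int) by push_cast [hc.1]; ring,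
            PySem.List.pyGetD_natCast, hgetTm]
        simp only [mA]
        rw [hd1, if_pos hc]
      · rw [if_neg hc]
        simp only [mA]
        rw [hd1, if_neg hc]
    · rw [PySem.List.length_pySetD, hlen]
    · intro j
      have hs := PySem.List.pyGetD_pySetD_natCast D (t+1) j (lf a (t+1), d1 a (t+1)) ((1:Int),(1:Int)) (by omega)
      simp only [PySem.List.pyGetD_natCast] at hs
      rw [hs]
      by_cases hj : j = t + 1
      · subst hj
        rw [if_pos rfl, if_pos (by omega)]
      · rw [if_neg hj, hget j]
        by_cases hj2 : j ≤ t ∧ j < n.toNat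
        · rw [if_pos hj2, if_pos (by omega)]
        · rw [if_neg hj2, if_neg (by omega)]


lemma invL (a : List Int) (n : Int) (h1 : 1 ≤ n) :
    ∀ t : Nat, t ≤ n.toNat - 1 →
    ∃ L : List Int,
      (PySem.List.pyRange 1 (1 + (t : Int))).foldl (stepL a) (List.replicate n.toNat (1:Int)) = L
      ∧ L.length = n.toNat
      ∧ (∀ j : Nat, L.getD j 1 = if j ≤ t ∧ j < n.toNat then lf a j else 1) := by
  intro t
  induction t with
  | zero =>
    intro ht
    refine ⟨List.replicate n.toNat (1:Int), ?_, by simp, ?_⟩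
    · rw [show (1 : Int) + ((0:Nat):Int) = 1 by ring, PySem.List.pyRange_one_eq_nil (le_refl 1)]
      simp
    · intro j
      split
      · next h =>
        have : j = 0 := by omega
        subst this
        rw [List.getD_replicate _ (by omega)]
        simp [lf]
      · next h =>
        rcases Nat.lt_or_ge j n.toNat with hj | hj
        · rw [List.getD_replicate _ hj]
        · rw [List.getD_eq_default _ _ (by simpa using hj)]
  | succ t ih =>
    intro ht
    obtain ⟨L, hfold, hlen, hget⟩ := ih (by omega)
    have htN : t + 1 < n.toNat := by omega
    have hgetT : L.getD t 1 = lf a t := by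
      rw [hget t, if_pos (by omega)]
    have hsplit : PySem.List.pyRange 1 (1 + ((t+1 : Nat) : Int)) = PySem.List.pyRange 1 (1 + (t:Int)) ++ [1 + (t:Int)] := by
      rw [show (1 : Int) + ((t+1 : Nat) : Int) = (1 + (t:Int)) + 1 by push_cast; ring]
      exact PySem.List.pyRange_one_succ_right (by omega)
    rw [hsplit, List.foldl_append, hfold]
    simp only [List.foldl_cons, List.foldl_nil]
    rw [show (1 : Int) + (t:Int) = ((t+1 : Nat) : Int) by push_cast; ring]
    simp only [stepL]
    rw [show ((t+1 : Nat) : Int) - 1 = ((t : Nat) : Int) by push_cast; ring]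
    simp only [PySem.List.pyGetD_natCast, av_eq]
    rw [hgetT]
    by_cases hs : av a (t+1) > av a t
    · rw [if_pos hs]
      refine ⟨_, rfl, by rw [PySem.List.length_pySetD, hlen], ?_⟩
      intro j
      have hsv := PySem.List.pyGetD_pySetD_natCast L (t+1) j (lf a t + 1) 1 (by omega)
      simp only [PySem.List.pyGetD_natCast] at hsv
      rw [hsv]
      by_cases hj : j = t + 1
      · subst hj
        rw [if_pos rfl, if_pos (by omega)]
        simp only [lf]
        rw [if_pos hs]
      · rw [if_neg hj, hget j]
        by_cases hj2 : j ≤ t ∧ j < n.toNat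
        · rw [if_pos hj2, if_pos (by omega)]
        · rw [if_neg hj2, if_neg (by omega)]
    · rw [if_neg hs]
      refine ⟨L, rfl, hlen, ?_⟩
      intro j
      rw [hget j]
      by_cases hj : j = t + 1
      · subst hj
        rw [if_neg (by omega), if_pos (by omega)]
        simp only [lf]
        rw [if_neg hs]
      · by_cases hj2 : j ≤ t ∧ j < n.toNat
        · rw [if_pos hj2, if_pos (by omega)]
        · rw [if_neg hj2, if_neg (by omega)]

lemma invR (a : List Int) (n : Int) (h1 : 1 ≤ n) :
    ∀ k : Nat, k ≤ n.toNat - 1 → ∀ R : List Int, R.length = n.toNat →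
    (∀ j : Nat, j < n.toNat → R.getD j 1 = if k ≤ j then rg a n.toNat j else 1) →
    ∃ R' : List Int,
      (PySem.List.pyRange ((k:Int) - 1) (-1) (-1)).foldl (stepR a) R = R'
      ∧ R'.length = n.toNat
      ∧ (∀ j : Nat, j < n.toNat → R'.getD j 1 = rg a n.toNat j) := by
  intro k
  induction k with
  | zero =>
    intro _ R hlen hget
    rw [show ((0:Nat):Int) - 1 = -1 by ring, PySem.List.pyRange_neg_one_eq_nil (le_refl (-1))]
    refine ⟨R, rfl, hlen, ?_⟩
    intro j hj
    rw [hget j hj, if_pos (by omega)]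
  | succ k ih =>
    intro hk R hlen hget
    have hkN : k + 1 < n.toNat := by omega
    rw [show ((k+1:Nat):Int) - 1 = ((k:Nat):Int) by push_cast; ring,
        PySem.List.pyRange_neg_one_cons (by omega)]
    simp only [List.foldl_cons]
    have hstep : ∃ R1 : List Int, stepR a R ((k:Nat):Int) = R1 ∧ R1.length = n.toNat ∧
        (∀ j : Nat, j < n.toNat → R1.getD j 1 = if k ≤ j then rg a n.toNat j else 1) := by
      simp only [stepR]
      rw [show ((k:Nat):Int) + 1 = ((k+1:Nat):Int) by push_cast; ring]
      simp only [PySem.List.pyGetD_natCast, av_eq]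
      have hgetK1 : R.getD (k+1) 1 = rg a n.toNat (k+1) := by
        rw [hget (k+1) hkN, if_pos (by omega)]
      rw [hgetK1]
      by_cases hs : av a k < av a (k+1)
      · rw [if_pos hs]
        refine ⟨_, rfl, by rw [PySem.List.length_pySetD, hlen], ?_⟩
        intro j hj
        have hsv := PySem.List.pyGetD_pySetD_natCast R k j (rg a n.toNat (k+1) + 1) 1 (by omega)
        simp only [PySem.List.pyGetD_natCast] at hsv
        rw [hsv]
        by_cases hjk : j = k
        · subst hjk
          rw [if_pos rfl, if_pos (by omega)]
          conv_rhs => rw [rg]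
          rw [dif_pos ⟨hkN, hs⟩]
        · rw [if_neg hjk, hget j hj]
          by_cases hj2 : k + 1 ≤ j
          · rw [if_pos hj2, if_pos (by omega)]
          · rw [if_neg hj2, if_neg (by omega)]
      · rw [if_neg hs]
        refine ⟨R, rfl, hlen, ?_⟩
        intro j hj
        rw [hget j hj]
        by_cases hjk : j = k
        · subst hjk
          rw [if_neg (by omega), if_pos (by omega)]
          rw [rg, dif_neg (by tauto)]
        · by_cases hj2 : k + 1 ≤ j
          · rw [if_pos hj2, if_pos (by omega)]
          · rw [if_neg hj2, if_neg (by omega)]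
    obtain ⟨R1, hR1, hlen1, hget1⟩ := hstep
    rw [hR1]
    exact ih (by omega) R1 hlen1 hget1

lemma maxLeft (a : List Int) (N : Nat) (hN : 1 ≤ N) (L : List Int) (hlen : L.length = N)
    (hget : ∀ j : Nat, j < N → L.getD j 1 = lf a j) :
    (PySem.List.max? L (fun x => x)).getD 1 = bestL a (N - 1) := by
  obtain ⟨m, hm⟩ : ∃ m, PySem.List.max? L (fun x => x) = some m := by
    cases hmx : PySem.List.max? L (fun x => x) with
    | none =>
      rw [PySem.List.max?_eq_none_iff] at hmx
      subst hmx
      simp at hlen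
      omega
    | some m => exact ⟨m, rfl⟩
  rw [hm, Option.getD_some]
  have hmem := PySem.List.max?_mem hm
  have hmax := PySem.List.max?_isMax hm
  obtain ⟨i, hi, hie⟩ := List.mem_iff_getElem.mp hmem
  apply le_antisymm
  · have : m = lf a i := by
      rw [← hie, ← List.getD_eq_getElem L 1 hi, hget i (by omega)]
    rw [this]
    exact bestL_ge_lf a (N - 1) i (by omega)
  · obtain ⟨j0, hj0, hj0e⟩ := bestL_mem a (N - 1)
    rw [hj0e]
    have hj0N : j0 < N := by omega
    have : lf a j0 = L[j0] := by
      rw [← List.getD_eq_getElem L 1 (by omega), hget j0 hj0N]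
    rw [this]
    exact hmax _ (List.getElem_mem _)

-- ===== VERDICT =====
theorem max_increasing_subarray_length_spec : Claim_equal_max_increasing_subarray_length := by
  intro a n _ hpre
  unfold Spec_max_increasing_subarray_length
  rcases hpre with h0 | ⟨h1, hlenA⟩
  · subst h0
    simp [max_increasing_subarray_length, max_increasing_subarray_length_alt]
  · have hN1 : 1 ≤ n.toNat := by omega
    have hnN : ((n.toNat : Nat) : Int) = n := Int.toNat_of_nonneg (by omega)
    simp only [max_increasing_subarray_length, max_increasing_subarray_length_alt]
    rw [if_neg (by omega), if_neg (by omega)]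
    -- A's initial dp and loop
    have hinitA : PySem.List.pySetD ((PySem.List.pyRange 0 n 1).map (fun _ => ((1:Int),(1:Int)))) 0 ((1:Int),(1:Int)) = List.replicate n.toNat ((1:Int),(1:Int)) := by
      simp [List.map_const', PySem.List.length_pyRange_one]
      rw [show (0:Int) = ((0:Nat):Int) from rfl, PySem.List.pySetD_natCast]
      apply List.ext_getElem <;> simp
    have hrange1 : PySem.List.pyRange 1 n 1 = PySem.List.pyRange 1 (1 + ((n.toNat - 1 : Nat) : Int)) 1 := by
      congr 1
      omega
    obtain ⟨D, hfoldA, _hDlen, _hDget⟩ := invA a n h1 (n.toNat - 1) (le_refl _)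
    rw [hinitA, hrange1, hfoldA]
    -- B's left table
    obtain ⟨L, hfoldL, hLlen, hLget⟩ := invL a n h1 (n.toNat - 1) (le_refl _)
    have hLget' : ∀ j : Nat, j < n.toNat → L.getD j 1 = lf a j := by
      intro j hj
      rw [hLget j, if_pos (by omega)]
    -- B's right table
    have hinitR : ∀ j : Nat, j < n.toNat → (List.replicate n.toNat (1:Int)).getD j 1 = if n.toNat - 1 ≤ j then rg a n.toNat j else 1 := by
      intro j hj
      rw [List.getD_replicate _ hj]
      by_cases hc : n.toNat - 1 ≤ j
      · rw [if_pos hc, rg, dif_neg (fun hh => absurd hh.1 (by omega))]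
      · rw [if_neg hc]
    obtain ⟨R, hfoldR, hRlen, hRget⟩ := invR a n h1 (n.toNat - 1) (by omega) (List.replicate n.toNat 1) (by simp) hinitR
    have hrangeC : PySem.List.pyRange (n - 2) (-1) (-1) = PySem.List.pyRange (((n.toNat - 1 : Nat) : Int) - 1) (-1) (-1) := by
      congr 1
      omega
    rw [PySem.List.pyRepeat_singleton, hfoldL, hrangeC, hfoldR,
        maxLeft a n.toNat hN1 L hLlen hLget']
    -- replace the combining loop body by its value on the range's members
    have hbody : ∀ (acc : Int), ∀ x ∈ PySem.List.pyRange 1 (n - 1) 1, stepC a L R acc x =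
        (fun (acc : Int) (x : Int) => if av a (x.toNat - 1) < av a (x.toNat + 1) then
          max acc (lf a (x.toNat - 1) + rg a n.toNat (x.toNat + 1)) else acc) acc x := by
      intro acc x hx
      obtain ⟨hx1, hx2⟩ := PySem.List.mem_pyRange_one.mp hx
      have hxt : x = ((x.toNat : Nat) : Int) := by omega
      have hjn1 : 1 ≤ x.toNat := by omega
      have hjn2 : x.toNat + 1 < n.toNat := by omega
      simp only [stepC]
      rw [show x - 1 = ((x.toNat - 1 : Nat) : Int) by omega,
          show x + 1 = ((x.toNat + 1 : Nat) : Int) by omega]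
      simp only [PySem.List.pyGetD_natCast, av_eq]
      rw [hLget' (x.toNat - 1) (by omega), hRget (x.toNat + 1) hjn2]
    rw [PySem.List.foldl_congr_mem _ _ _ _ hbody]
    set BV := (PySem.List.pyRange 1 (n - 1) 1).foldl
        (fun (acc : Int) (x : Int) => if av a (x.toNat - 1) < av a (x.toNat + 1) then
          max acc (lf a (x.toNat - 1) + rg a n.toNat (x.toNat + 1)) else acc)
        (bestL a (n.toNat - 1)) with hBV
    have hInitLe := gfold_init_le (fun x : Int => av a (x.toNat - 1) < av a (x.toNat + 1))
      (fun x : Int => lf a (x.toNat - 1) + rg a n.toNat (x.toNat + 1))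
      (PySem.List.pyRange 1 (n - 1) 1) (bestL a (n.toNat - 1))
    rw [← hBV] at hInitLe
    apply le_antisymm
    · -- A's running max is bounded by B's result
      have hAle : ∀ k : Nat, k ≤ n.toNat - 1 → mA a k ≤ BV := by
        intro k
        induction k with
        | zero =>
          intro _
          have hb := bestL_ge_lf a (n.toNat - 1) 0 (by omega)
          have hl0 : lf a 0 = 1 := by simp [lf]
          simp only [mA]
          omega
        | succ k ih =>
          intro hk
          have h2 := bestL_ge_lf a (n.toNat - 1) (k + 1) (by omega)
          have h3 : d1 a (k + 1) ≤ BV := by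
            rcases d1_char a (k + 1) with hch | ⟨j, hj1, hj2, hj3, hj4, hj5⟩
            · omega
            · have hjN : j + 1 < n.toNat := by omega
              have hmem : ((j : Nat) : Int) ∈ PySem.List.pyRange 1 (n - 1) 1 :=
                PySem.List.mem_pyRange_one.mpr ⟨by omega, by omega⟩
              have hvle := gfold_mem_le (fun x : Int => av a (x.toNat - 1) < av a (x.toNat + 1))
                (fun x : Int => lf a (x.toNat - 1) + rg a n.toNat (x.toNat + 1))
                (PySem.List.pyRange 1 (n - 1) 1) (bestL a (n.toNat - 1)) ((j : Nat) : Int)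
                hmem (by simpa using hj3)
              rw [← hBV] at hvle
              simp only [Int.toNat_natCast] at hvle
              have hrg := run_rg a n.toNat (k + 1) j (by omega) (by omega) hj4
              omega
          have h4 := ih (by omega)
          simp only [mA]
          omega
      exact hAle (n.toNat - 1) (le_refl _)
    · -- B's result is bounded by A's running max
      apply gfold_le
      · exact bestL_le_mA a (n.toNat - 1)
      · intro x hx hcx
        obtain ⟨hx1, hx2⟩ := PySem.List.mem_pyRange_one.mp hx
        have hjn1 : 1 ≤ x.toNat := by omega
        have hjn2 : x.toNat + 1 < n.toNat := by omega
        have h5 := d1_merge a x.toNat hjn1 hcx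
        have h6 := d1_rg_le a n.toNat hN1 n.toNat (x.toNat + 1) (by omega) hjn2
        have h7 := rg_pos a n.toNat (x.toNat + 1)
        omega
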